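-- pv_equiv track=rewrite | github.com/Mouse-hybrid/PC-store-management-system_-he-thong-cua-hang-pc- | replace_signup_background.py | flood_background_mask
-- ===== SOURCE A (Python) =====
-- from collections import deque
--
-- def color_dist(a: tuple[int, int, int], b: tuple[int, int, int]) -> int:
--     return abs(a[0] - b[0]) + abs(a[1] - b[1]) + abs(a[2] - b[2])
--
-- def flood_background_mask(
--     pixels: list[list[tuple[int, int, int]]],
--     w: int,
--     h: int,
--     seeds: list[tuple[int, int]],
--     ref: tuple[int, int, int],
--     max_dist: int = 28,
-- ) -> list[list[bool]]:
--     mask = [[False] * w for _ in range(h)]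
--     q: deque[tuple[int, int]] = deque()
--
--     def try_add(x: int, y: int) -> None:
--         if x < 0 or x >= w or y < 0 or y >= h or mask[y][x]:
--             return
--         if color_dist(pixels[y][x], ref) > max_dist:
--             return
--         mask[y][x] = True
--         q.append((x, y))
--
--     for sx, sy in seeds:
--         if 0 <= sx < w and 0 <= sy < h and color_dist(pixels[sy][sx], ref) <= max_dist:
--             mask[sy][sx] = True
--             q.append((sx, sy))
--
--     while q:
--         x, y = q.popleft()
--         for nx, ny in ((x + 1, y), (x - 1, y), (x, y + 1), (x, y - 1)):
--             if 0 <= nx < w and 0 <= ny < h and not mask[ny][nx]: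
--                 if color_dist(pixels[ny][nx], ref) <= max_dist:
--                     mask[ny][nx] = True
--                     q.append((nx, ny))
--
--     return mask
-- ===== SOURCE B (Python) =====
-- def flood_background_mask(
--     pixels,
--     w,
--     h,
--     seeds,
--     ref,
--     max_dist=28,
-- ):
--     # Fixed-point sweep flood fill: no queue; repeatedly recompute the whole
--     # mask, marking any matching cell 4-adjacent to a marked cell, until stable.
--     def ok(x, y):
--         r, g, b = pixels[y][x]
--         rr, rg, rb = ref
--         return abs(r - rr) + abs(g - rg) + abs(b - rb) <= max_dist
--
--     mask = [[False] * w for _ in range(h)]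
--     for sx, sy in seeds:
--         if 0 <= sx < w and 0 <= sy < h and ok(sx, sy):
--             mask[sy][sx] = True
--
--     while True:
--         new = [
--             [
--                 mask[y][x]
--                 or (
--                     (
--                         (x + 1 < w and mask[y][x + 1])
--                         or (x > 0 and mask[y][x - 1])
--                         or (y + 1 < h and mask[y + 1][x])
--                         or (y > 0 and mask[y - 1][x])
--                     )
--                     and ok(x, y)
--                 )
--                 for x in range(w)
--             ]
--             for y in range(h)
--         ]
--         if new == mask:
--             return mask
--         mask = new
-- ===== Notes on version B (the rewrite author's own statement) =====
-- stated objective: alternative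
-- what changed: Replaced the explicit deque-based BFS (pop a pixel, push its fresh matching neighbours) by a queue-free fixed-point computation: the whole mask is recomputed in sweeps that mark any matching cell 4-adjacent to a marked cell, until a sweep changes nothing.
import Mathlib
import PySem

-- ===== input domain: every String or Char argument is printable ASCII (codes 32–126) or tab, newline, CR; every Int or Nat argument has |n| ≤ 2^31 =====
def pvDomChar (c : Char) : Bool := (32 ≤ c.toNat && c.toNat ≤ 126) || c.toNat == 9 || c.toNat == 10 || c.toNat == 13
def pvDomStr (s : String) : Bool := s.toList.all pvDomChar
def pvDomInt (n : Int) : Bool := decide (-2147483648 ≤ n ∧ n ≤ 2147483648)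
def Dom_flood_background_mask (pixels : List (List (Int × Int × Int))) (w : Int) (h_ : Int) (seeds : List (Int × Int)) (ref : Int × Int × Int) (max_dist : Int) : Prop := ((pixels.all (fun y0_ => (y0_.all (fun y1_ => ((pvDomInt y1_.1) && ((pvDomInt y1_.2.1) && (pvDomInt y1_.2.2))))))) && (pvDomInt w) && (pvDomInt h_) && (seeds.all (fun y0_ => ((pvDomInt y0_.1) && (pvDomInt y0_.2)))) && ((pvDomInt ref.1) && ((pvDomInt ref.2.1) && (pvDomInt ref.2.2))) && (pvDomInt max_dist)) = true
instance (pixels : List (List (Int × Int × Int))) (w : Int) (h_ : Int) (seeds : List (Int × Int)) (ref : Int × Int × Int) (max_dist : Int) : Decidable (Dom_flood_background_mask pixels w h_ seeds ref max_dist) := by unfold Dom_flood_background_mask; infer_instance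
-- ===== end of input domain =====

-- B replaces A's deque-based BFS flood fill by a queue-free fixed-point sweep
-- (recompute the whole mask until stable); same mask, different algorithm ("alternative").

-- ===== SHARED LOW-LEVEL HELPERS (both Pythons index pixels/mask the same way) =====

-- color_dist(a, b)
def pvDist (a b : Int × Int × Int) : Int := |a.1 - b.1| + |a.2.1 - b.2.1| + |a.2.2 - b.2.2|

-- pixels[y][x]; every call site is guarded by 0 ≤ x < w, 0 ≤ y < h, and under
-- Pre_ the grid backs those coordinates, so the default is never read there
-- (outside Pre_ the Python raises IndexError).
def pvPix (pixels : List (List (Int × Int × Int))) (y x : Int) : Int × Int × Int :=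
  (pixels.getD y.toNat []).getD x.toNat (0, 0, 0)

-- color_dist(pixels[y][x], ref) <= max_dist, the one color test both programs use
def pvGood (pixels : List (List (Int × Int × Int))) (ref : Int × Int × Int) (max_dist : Int) (x y : Int) : Bool :=
  decide (pvDist (pvPix pixels y x) ref ≤ max_dist)

-- mask[y][x]; call sites guarded by 0 ≤ x, 0 ≤ y and the mask's own shape
def pvMGet (m : List (List Bool)) (y x : Int) : Bool := (m.getD y.toNat []).getD x.toNat false

-- mask[y][x] = True
def pvMSet (m : List (List Bool)) (y x : Int) : List (List Bool) :=
  m.modify y.toNat (fun row => row.set x.toNat true)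

-- [[False] * w for _ in range(h)]
def pvMask0 (w h_ : Int) : List (List Bool) := List.replicate h_.toNat (List.replicate w.toNat false)

-- ===== PORT A =====
-- (A's local `try_add` is dead code — never called — and is not ported.)

-- body of A's seed loop, one seed (helpers are parameterised by the color test `good`)
def pvSeedStep (w h_ : Int) (good : Int → Int → Bool)
    (st : List (List Bool) × List (Int × Int)) (s : Int × Int) : List (List Bool) × List (Int × Int) :=
  if 0 ≤ s.1 ∧ s.1 < w ∧ 0 ≤ s.2 ∧ s.2 < h_ ∧ good s.1 s.2 = true
  then (pvMSet st.1 s.2 s.1, st.2 ++ [s]) else st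

-- body of A's neighbour loop, one neighbour
def pvNbrStep (w h_ : Int) (good : Int → Int → Bool)
    (st : List (List Bool) × List (Int × Int)) (n : Int × Int) : List (List Bool) × List (Int × Int) :=
  if 0 ≤ n.1 ∧ n.1 < w ∧ 0 ≤ n.2 ∧ n.2 < h_ ∧ pvMGet st.1 n.2 n.1 = false ∧ good n.1 n.2 = true
  then (pvMSet st.1 n.2 n.1, st.2 ++ [n]) else st

-- A's `while q:` loop; the fuel only makes the recursion structural — the loop
-- runs at most (#cells + #seed enqueues) iterations, proved below.
def pvBFS (w h_ : Int) (good : Int → Int → Bool) : Nat → List (List Bool) → List (Int × Int) → List (List Bool)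
  | 0, m, _ => m
  | _ + 1, m, [] => m
  | f + 1, m, p :: rest =>
      let st := [(p.1 + 1, p.2), (p.1 - 1, p.2), (p.1, p.2 + 1), (p.1, p.2 - 1)].foldl
        (pvNbrStep w h_ good) (m, rest)
      pvBFS w h_ good f st.1 st.2

def flood_background_mask (pixels : List (List (Int × Int × Int))) (w : Int) (h_ : Int) (seeds : List (Int × Int)) (ref : Int × Int × Int) (max_dist : Int) : List (List Bool) :=
  pvBFS w h_ (pvGood pixels ref max_dist) (h_.toNat * w.toNat + seeds.length + 1)
    (seeds.foldl (pvSeedStep w h_ (pvGood pixels ref max_dist)) (pvMask0 w h_, [])).1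
    (seeds.foldl (pvSeedStep w h_ (pvGood pixels ref max_dist)) (pvMask0 w h_, [])).2

-- ===== PORT B =====

-- body of B's seed loop (B keeps no queue)
def pvSeedMark (w h_ : Int) (good : Int → Int → Bool)
    (m : List (List Bool)) (s : Int × Int) : List (List Bool) :=
  if 0 ≤ s.1 ∧ s.1 < w ∧ 0 ≤ s.2 ∧ s.2 < h_ ∧ good s.1 s.2 = true
  then pvMSet m s.2 s.1 else m

-- the per-cell expression of B's sweep comprehension
def pvEntry (w h_ : Int) (good : Int → Int → Bool) (m : List (List Bool)) (x y : Int) : Bool :=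
  pvMGet m y x ||
    (((decide (x + 1 < w) && pvMGet m y (x + 1)) ||
      (decide (0 < x) && pvMGet m y (x - 1)) ||
      (decide (y + 1 < h_) && pvMGet m (y + 1) x) ||
      (decide (0 < y) && pvMGet m (y - 1) x)) && good x y)

-- one whole-grid sweep: new = [[ … for x in range(w)] for y in range(h)]
def pvStep (w h_ : Int) (good : Int → Int → Bool) (m : List (List Bool)) : List (List Bool) :=
  (PySem.List.pyRange 0 h_ 1).map (fun y => (PySem.List.pyRange 0 w 1).map (fun x => pvEntry w h_ good m x y))

-- B's `while True:` loop; fuel only for structural recursion — a non-final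
-- sweep strictly grows the marked set, so #cells + 1 sweeps suffice (proved below).
def pvSweep (w h_ : Int) (good : Int → Int → Bool) : Nat → List (List Bool) → List (List Bool)
  | 0, m => m
  | f + 1, m =>
      let n := pvStep w h_ good m
      if n = m then m else pvSweep w h_ good f n

def flood_background_mask_alt (pixels : List (List (Int × Int × Int))) (w : Int) (h_ : Int) (seeds : List (Int × Int)) (ref : Int × Int × Int) (max_dist : Int) : List (List Bool) :=
  pvSweep w h_ (pvGood pixels ref max_dist) (h_.toNat * w.toNat + 1)
    (seeds.foldl (pvSeedMark w h_ (pvGood pixels ref max_dist)) (pvMask0 w h_))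

-- ===== PRECONDITION & SPEC =====
-- Both Pythons index pixels[y][x] only at in-bounds coordinates the fill reaches
-- (A at in-bounds seeds and at neighbours of dequeued cells, B at in-bounds seeds
-- and at cells adjacent to marked ones), and raise IndexError when the grid does
-- not back such a coordinate; Pre_ excludes every input whose w×h rectangle is
-- not fully backed by `pixels` while some seed is in bounds.  This is slightly
-- narrower than "no IndexError": on a ragged grid whose missing cells the fill
-- never reaches both programs still return (see cites in the claim).
def Pre_flood_background_mask (pixels : List (List (Int × Int × Int))) (w : Int) (h_ : Int) (seeds : List (Int × Int)) (ref : Int × Int × Int) (max_dist : Int) : Prop :=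
  w ≤ 0 ∨ h_ ≤ 0 ∨ (∀ s ∈ seeds, ¬(0 ≤ s.1 ∧ s.1 < w ∧ 0 ≤ s.2 ∧ s.2 < h_)) ∨
    (h_.toNat ≤ pixels.length ∧ ∀ row ∈ pixels.take h_.toNat, w.toNat ≤ row.length)
instance (pixels : List (List (Int × Int × Int))) (w : Int) (h_ : Int) (seeds : List (Int × Int)) (ref : Int × Int × Int) (max_dist : Int) : Decidable (Pre_flood_background_mask pixels w h_ seeds ref max_dist) := by unfold Pre_flood_background_mask; infer_instance

def pvWitness_flood_background_mask : (List (List (Int × Int × Int))) × Int × Int × (List (Int × Int)) × (Int × Int × Int) × Int :=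
  ([[(10, 10, 10), (200, 200, 200)], [(12, 12, 12), (11, 11, 11)]], 2, 2, [(0, 0)], (10, 10, 10), 28)

def Spec_flood_background_mask (pixels : List (List (Int × Int × Int))) (w : Int) (h_ : Int) (seeds : List (Int × Int)) (ref : Int × Int × Int) (max_dist : Int) (out : List (List Bool)) : Prop := out = flood_background_mask_alt pixels w h_ seeds ref max_dist
instance (pixels : List (List (Int × Int × Int))) (w : Int) (h_ : Int) (seeds : List (Int × Int)) (ref : Int × Int × Int) (max_dist : Int) (out : List (List Bool)) : Decidable (Spec_flood_background_mask pixels w h_ seeds ref max_dist out) := by unfold Spec_flood_background_mask; infer_instance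

-- ===== CLAIM (what is proved, stated in full; the proofs are below) =====
def Claim_equal_flood_background_mask : Prop := ∀ (pixels : List (List (Int × Int × Int))) (w : Int) (h_ : Int) (seeds : List (Int × Int)) (ref : Int × Int × Int) (max_dist : Int), Dom_flood_background_mask pixels w h_ seeds ref max_dist → Pre_flood_background_mask pixels w h_ seeds ref max_dist → Spec_flood_background_mask pixels w h_ seeds ref max_dist (flood_background_mask pixels w h_ seeds ref max_dist)

-- ===== LEMMAS AND PROOFS =====
-- The two ports agree on ALL inputs (the proof below never uses Dom/Pre_): both
-- compute the set of cells 4-reachable from the qualifying seeds through cells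
-- passing the same color test, and that set determines the returned mask.

-- 4-adjacency as A enumerates it
def pvAdj (x y nx ny : Int) : Prop :=
  (nx = x + 1 ∧ ny = y) ∨ (nx = x - 1 ∧ ny = y) ∨ (nx = x ∧ ny = y + 1) ∨ (nx = x ∧ ny = y - 1)

-- the reachable set both algorithms compute
inductive pvReach (w h_ : Int) (good : Int → Int → Bool) (seeds : List (Int × Int)) : Int → Int → Prop
  | seed (x y : Int) : (x, y) ∈ seeds → 0 ≤ x → x < w → 0 ≤ y → y < h_ → good x y = true →
      pvReach w h_ good seeds x y
  | step (x y nx ny : Int) : pvReach w h_ good seeds x y → pvAdj x y nx ny →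
      0 ≤ nx → nx < w → 0 ≤ ny → ny < h_ → good nx ny = true → pvReach w h_ good seeds nx ny

def pvShaped (w h_ : Int) (m : List (List Bool)) : Prop :=
  m.length = h_.toNat ∧ ∀ r ∈ m, r.length = w.toNat

def pvCnt (m : List (List Bool)) : Nat := (m.map (fun r => r.count false)).sum

lemma pvReach_bounds (w h_ : Int) (good : Int → Int → Bool) (seeds : List (Int × Int))
    (x y : Int) (h : pvReach w h_ good seeds x y) :
    0 ≤ x ∧ x < w ∧ 0 ≤ y ∧ y < h_ ∧ good x y = true := by
  cases h with
  | seed _ _ _ h1 h2 h3 h4 h5 => exact ⟨h1, h2, h3, h4, h5⟩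
  | step _ _ _ _ _ _ h1 h2 h3 h4 h5 => exact ⟨h1, h2, h3, h4, h5⟩

lemma pvReach_min (w h_ : Int) (good : Int → Int → Bool) (seeds : List (Int × Int))
    (M : Int → Int → Prop)
    (hseed : ∀ x y, (x, y) ∈ seeds → 0 ≤ x → x < w → 0 ≤ y → y < h_ → good x y = true → M x y)
    (hstep : ∀ x y nx ny, pvReach w h_ good seeds x y → M x y → pvAdj x y nx ny →
      0 ≤ nx → nx < w → 0 ≤ ny → ny < h_ → good nx ny = true → M nx ny) :
    ∀ x y, pvReach w h_ good seeds x y → M x y := by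
  intro x y h
  induction h with
  | seed a b h1 h2 h3 h4 h5 h6 => exact hseed a b h1 h2 h3 h4 h5 h6
  | step a b na nb hr hadj h1 h2 h3 h4 h5 ih => exact hstep a b na nb hr ih hadj h1 h2 h3 h4 h5


-- row/grid write primitives, described index-by-index
lemma pvRowSet_getD : ∀ (r : List Bool) (xn xn' : Nat),
    (r.set xn true).getD xn' false = (r.getD xn' false || (decide (xn = xn') && decide (xn < r.length))) := by
  intro r
  induction r with
  | nil => intro xn xn'; simp
  | cons a t ih =>
    intro xn xn'
    cases xn with
    | zero => cases xn' <;> simp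
    | succ k =>
      cases xn' with
      | zero => simp
      | succ k2 => simpa [Nat.succ_lt_succ_iff] using ih k k2

lemma pvMasterN : ∀ (m : List (List Bool)) (yn xn yn' xn' : Nat),
    ((m.modify yn (fun r => r.set xn true)).getD yn' []).getD xn' false
      = (((m.getD yn' []).getD xn' false) ||
        (decide (yn = yn') && decide (xn = xn') && decide (yn < m.length) &&
         decide (xn < (m.getD yn []).length))) := by
  intro m
  induction m with
  | nil => intro yn xn yn' xn'; simp [List.modify_nil]
  | cons a t ih =>
    intro yn xn yn' xn'
    cases yn with
    | zero =>
      have hm : (a :: t).modify 0 (fun r => r.set xn true) = a.set xn true :: t := by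
        simp [List.modify]
      cases yn' with
      | zero => simpa [hm] using pvRowSet_getD a xn xn'
      | succ k' => simp [hm]
    | succ k =>
      have hm : (a :: t).modify (k+1) (fun r => r.set xn true)
          = a :: t.modify k (fun r => r.set xn true) := by
        simp [List.modify]
      cases yn' with
      | zero => simp [hm]
      | succ k' => simpa [hm, Nat.succ_lt_succ_iff] using ih k xn k' xn'

lemma pvModify_shape : ∀ (m : List (List Bool)) (yn : Nat) (f : List Bool → List Bool),
    (∀ r, (f r).length = r.length) → (m.modify yn f).length = m.length ∧
      (∀ r ∈ m.modify yn f, ∃ r' ∈ m, r.length = r'.length) := by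
  intro m
  induction m with
  | nil => intro yn f hf; simp [List.modify_nil]
  | cons a t ih =>
    intro yn f hf
    cases yn with
    | zero =>
      constructor
      · simp [List.modify]
      · intro r hr
        rw [show (a :: t).modify 0 f = f a :: t by simp [List.modify]] at hr
        rcases List.mem_cons.mp hr with h | h
        · exact ⟨a, List.mem_cons_self, by rw [h, hf]⟩
        · exact ⟨r, List.mem_cons_of_mem _ h, rfl⟩
    | succ k =>
      rw [show (a :: t).modify (k+1) f = a :: t.modify k f by simp [List.modify]]
      obtain ⟨h1, h2⟩ := ih k f hf
      refine ⟨by simp [h1], ?_⟩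
      intro r hr
      rcases List.mem_cons.mp hr with h | h
      · exact ⟨a, List.mem_cons_self, by rw [h]⟩
      · obtain ⟨r', hr', he⟩ := h2 r h
        exact ⟨r', List.mem_cons_of_mem _ hr', he⟩

lemma pvCntRow (r : List Bool) : ∀ (xn : Nat), xn < r.length → r.getD xn false = false →
    (r.set xn true).count false + 1 = r.count false := by
  induction r with
  | nil => intro xn h; simp at h
  | cons a t ih =>
    intro xn hlt hf
    cases xn with
    | zero =>
      simp only [List.getD_cons_zero] at hf
      subst hf
      simp [List.count_cons]
    | succ k =>
      simp only [List.getD_cons_succ] at hf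
      have := ih k (by simpa [Nat.succ_lt_succ_iff] using hlt) hf
      simp only [List.set_cons_succ, List.count_cons]
      omega

lemma pvCntRow_le (r : List Bool) : ∀ (xn : Nat), (r.set xn true).count false ≤ r.count false := by
  induction r with
  | nil => intro xn; simp
  | cons a t ih =>
    intro xn
    cases xn with
    | zero => cases a <;> simp [List.count_cons]
    | succ k =>
      have := ih k
      simp only [List.set_cons_succ, List.count_cons]
      omega

lemma pvCntN : ∀ (m : List (List Bool)) (yn xn : Nat), yn < m.length →
    xn < (m.getD yn []).length → (m.getD yn []).getD xn false = false →
    pvCnt (m.modify yn (fun r => r.set xn true)) + 1 = pvCnt m := by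
  intro m
  induction m with
  | nil => intro yn xn h; simp at h
  | cons a t ih =>
    intro yn xn hy hx hf
    cases yn with
    | zero =>
      rw [show (a :: t).modify 0 (fun r => r.set xn true) = a.set xn true :: t by simp [List.modify]]
      simp only [List.getD_cons_zero] at hx hf
      have := pvCntRow a xn hx hf
      simp only [pvCnt, List.map_cons, List.sum_cons]
      omega
    | succ k =>
      rw [show (a :: t).modify (k+1) (fun r => r.set xn true)
          = a :: t.modify k (fun r => r.set xn true) by simp [List.modify]]
      simp only [List.getD_cons_succ] at hx hf
      have := ih k xn (by simpa using hy) hx hf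
      simp only [pvCnt, List.map_cons, List.sum_cons] at this ⊢
      omega

lemma pvCntN_le : ∀ (m : List (List Bool)) (yn xn : Nat),
    pvCnt (m.modify yn (fun r => r.set xn true)) ≤ pvCnt m := by
  intro m
  induction m with
  | nil => intro yn xn; simp [List.modify_nil]
  | cons a t ih =>
    intro yn xn
    cases yn with
    | zero =>
      rw [show (a :: t).modify 0 (fun r => r.set xn true) = a.set xn true :: t by simp [List.modify]]
      have := pvCntRow_le a xn
      simp only [pvCnt, List.map_cons, List.sum_cons]
      omega
    | succ k =>
      rw [show (a :: t).modify (k+1) (fun r => r.set xn true)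
          = a :: t.modify k (fun r => r.set xn true) by simp [List.modify]]
      have := ih k xn
      simp only [pvCnt, List.map_cons, List.sum_cons] at this ⊢
      omega

lemma pvCnt_le_aux : ∀ (m : List (List Bool)) (W : Nat), (∀ r ∈ m, r.length = W) →
    pvCnt m ≤ m.length * W := by
  intro m
  induction m with
  | nil => intro W h; simp [pvCnt]
  | cons a t ih =>
    intro W h
    have h1 : a.count false ≤ W := by
      rw [← h a List.mem_cons_self]; exact List.count_le_length
    have h2 := ih W (fun r hr => h r (List.mem_cons_of_mem _ hr))
    simp only [pvCnt, List.map_cons, List.sum_cons, List.length_cons] at h2 ⊢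
    have : (t.length + 1) * W = t.length * W + W := by ring
    omega

-- master description of a single mask write
lemma pvMGet_mset (m : List (List Bool)) (y x y' x' : Int) :
    pvMGet (pvMSet m y x) y' x' =
      (pvMGet m y' x' ||
        (decide (y.toNat = y'.toNat) && decide (x.toNat = x'.toNat) &&
         decide (y.toNat < m.length) && decide (x.toNat < (m.getD y.toNat []).length))) := by
  unfold pvMGet pvMSet
  exact pvMasterN m y.toNat x.toNat y'.toNat x'.toNat

lemma pvMGet_mset_true (m : List (List Bool)) (y x y' x' : Int)
    (h : pvMGet m y' x' = true) : pvMGet (pvMSet m y x) y' x' = true := by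
  simp [pvMGet_mset, h]

lemma pvShaped_mset (w h_ : Int) (m : List (List Bool)) (y x : Int)
    (hs : pvShaped w h_ m) : pvShaped w h_ (pvMSet m y x) := by
  unfold pvMSet
  obtain ⟨h1, h2⟩ := pvModify_shape m y.toNat (fun r => r.set x.toNat true) (fun r => by simp)
  refine ⟨by rw [h1]; exact hs.1, ?_⟩
  intro r hr
  obtain ⟨r', hr', he⟩ := h2 r hr
  rw [he]; exact hs.2 r' hr' 

lemma pvMGet_mset_self (w h_ : Int) (m : List (List Bool)) (y x : Int)
    (hs : pvShaped w h_ m) (hx : 0 ≤ x) (hxw : x < w) (hy : 0 ≤ y) (hyh : y < h_) :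
    pvMGet (pvMSet m y x) y x = true := by
  rw [pvMGet_mset]
  have h1 : y.toNat < m.length := by rw [hs.1]; omega
  have h2 : x.toNat < (m.getD y.toNat []).length := by
    rw [List.getD_eq_getElem _ _ h1, hs.2 _ (List.getElem_mem _)]
    omega
  rw [List.getD_eq_getElem _ _ h1] at h2
  simp [h1, h2]

lemma pvMGet_mset_new (m : List (List Bool)) (y x y' x' : Int)
    (hx : 0 ≤ x) (hy : 0 ≤ y) (hx' : 0 ≤ x') (hy' : 0 ≤ y')
    (h : pvMGet (pvMSet m y x) y' x' = true) :
    pvMGet m y' x' = true ∨ (x' = x ∧ y' = y) := by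
  rw [pvMGet_mset] at h
  rcases Bool.or_eq_true_iff.mp h with h | h
  · exact Or.inl h
  · right; simp only [Bool.and_eq_true, decide_eq_true_eq] at h; omega

lemma pvCnt_mset (m : List (List Bool)) (y x : Int)
    (hy : y.toNat < m.length) (hx : x.toNat < (m.getD y.toNat []).length)
    (hf : pvMGet m y x = false) : pvCnt (pvMSet m y x) + 1 = pvCnt m := by
  unfold pvMGet at hf
  exact pvCntN m y.toNat x.toNat hy hx hf

lemma pvCnt_mset_le (m : List (List Bool)) (y x : Int) : pvCnt (pvMSet m y x) ≤ pvCnt m :=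
  pvCntN_le m y.toNat x.toNat

lemma pvCnt_le (w h_ : Int) (m : List (List Bool)) (hs : pvShaped w h_ m) :
    pvCnt m ≤ h_.toNat * w.toNat := by
  have := pvCnt_le_aux m w.toNat hs.2
  rw [hs.1] at this
  exact this

lemma pvShaped_mask0 (w h_ : Int) : pvShaped w h_ (pvMask0 w h_) := by
  constructor
  · simp [pvMask0]
  · intro r hr
    rw [List.eq_of_mem_replicate hr]
    simp

lemma pvMGet_mask0 (w h_ : Int) (y x : Int) : pvMGet (pvMask0 w h_) y x = false := by
  unfold pvMGet pvMask0
  rw [List.getD_eq_getElem?_getD, List.getD_eq_getElem?_getD, List.getElem?_replicate]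
  split
  · rw [Option.getD_some, List.getElem?_replicate]
    split <;> simp
  · simp

lemma pvMGet_getElem (m : List (List Bool)) (i j : Nat)
    (hi : i < m.length) (hj : j < (m[i]).length) : pvMGet m (↑i) (↑j) = m[i][j] := by
  unfold pvMGet
  rw [Int.toNat_natCast, Int.toNat_natCast, List.getD_eq_getElem _ _ hi, List.getD_eq_getElem _ _ hj]

-- mask determined by its in-range entries
lemma pvMask_ext (w h_ : Int) (a b : List (List Bool))
    (ha : pvShaped w h_ a) (hb : pvShaped w h_ b)
    (h : ∀ x y, 0 ≤ x → x < w → 0 ≤ y → y < h_ → (pvMGet a y x = true ↔ pvMGet b y x = true)) :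
    a = b := by
  apply List.ext_getElem (by rw [ha.1, hb.1])
  intro i h1 h2
  apply List.ext_getElem
  · rw [ha.2 _ (List.getElem_mem _), hb.2 _ (List.getElem_mem _)]
  · intro j hj1 hj2
    have hjw : j < w.toNat := by rw [ha.2 _ (List.getElem_mem _)] at hj1; exact hj1
    have hih : i < h_.toNat := ha.1 ▸ h1
    have hx : ((j : Int)) < w := by omega
    have hy : ((i : Int)) < h_ := by omega
    have hiff := h (↑j) (↑i) (Int.natCast_nonneg j) hx (Int.natCast_nonneg i) hy
    rw [pvMGet_getElem a i j h1 hj1, pvMGet_getElem b i j h2 hj2] at hiff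
    exact Bool.coe_iff_coe.mp hiff

-- ===== A side =====

lemma pvAdj_of_memL (p c : Int × Int)
    (h : c ∈ [(p.1 + 1, p.2), (p.1 - 1, p.2), (p.1, p.2 + 1), (p.1, p.2 - 1)]) :
    pvAdj p.1 p.2 c.1 c.2 := by
  simp only [List.mem_cons, List.not_mem_nil, or_false] at h
  rcases h with rfl | rfl | rfl | rfl <;> simp [pvAdj]

lemma pvMemL_of_adj (p : Int × Int) (nx ny : Int) (h : pvAdj p.1 p.2 nx ny) :
    (nx, ny) ∈ [(p.1 + 1, p.2), (p.1 - 1, p.2), (p.1, p.2 + 1), (p.1, p.2 - 1)] := by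
  rcases h with ⟨h1, h2⟩ | ⟨h1, h2⟩ | ⟨h1, h2⟩ | ⟨h1, h2⟩ <;> subst h1 <;> subst h2 <;> simp

def pvInvA (w h_ : Int) (good : Int → Int → Bool) (seeds : List (Int × Int))
    (m : List (List Bool)) (q : List (Int × Int)) : Prop :=
  pvShaped w h_ m ∧
  (∀ p ∈ q, 0 ≤ p.1 ∧ p.1 < w ∧ 0 ≤ p.2 ∧ p.2 < h_ ∧ pvMGet m p.2 p.1 = true) ∧
  (∀ x y, 0 ≤ x → x < w → 0 ≤ y → y < h_ → pvMGet m y x = true → pvReach w h_ good seeds x y) ∧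
  (∀ s ∈ seeds, 0 ≤ s.1 → s.1 < w → 0 ≤ s.2 → s.2 < h_ → good s.1 s.2 = true → pvMGet m s.2 s.1 = true) ∧
  (∀ x y, 0 ≤ x → x < w → 0 ≤ y → y < h_ → pvMGet m y x = true → (x, y) ∉ q →
    ∀ nx ny, pvAdj x y nx ny → 0 ≤ nx → nx < w → 0 ≤ ny → ny < h_ → good nx ny = true →
      pvMGet m ny nx = true)

lemma pvFold_nbr (w h_ : Int) (good : Int → Int → Bool) :
    ∀ (L : List (Int × Int)) (m : List (List Bool)) (q : List (Int × Int)),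
    pvShaped w h_ m →
    pvShaped w h_ ((L.foldl (pvNbrStep w h_ good) (m, q)).1) ∧
    (∀ y x, pvMGet m y x = true → pvMGet ((L.foldl (pvNbrStep w h_ good) (m, q)).1) y x = true) ∧
    (∀ x y, 0 ≤ x → 0 ≤ y → pvMGet ((L.foldl (pvNbrStep w h_ good) (m, q)).1) y x = true →
      pvMGet m y x = true ∨ ((x, y) ∈ L ∧ 0 ≤ x ∧ x < w ∧ 0 ≤ y ∧ y < h_ ∧ good x y = true)) ∧
    (∃ t, (L.foldl (pvNbrStep w h_ good) (m, q)).2 = q ++ t ∧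
      ∀ p ∈ t, p ∈ L ∧ 0 ≤ p.1 ∧ p.1 < w ∧ 0 ≤ p.2 ∧ p.2 < h_ ∧ good p.1 p.2 = true ∧
        pvMGet ((L.foldl (pvNbrStep w h_ good) (m, q)).1) p.2 p.1 = true) ∧
    (∀ n ∈ L, 0 ≤ n.1 → n.1 < w → 0 ≤ n.2 → n.2 < h_ → good n.1 n.2 = true →
      pvMGet ((L.foldl (pvNbrStep w h_ good) (m, q)).1) n.2 n.1 = true) ∧
    (pvCnt ((L.foldl (pvNbrStep w h_ good) (m, q)).1) + ((L.foldl (pvNbrStep w h_ good) (m, q)).2).length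
      = pvCnt m + q.length) ∧
    (∀ x y, 0 ≤ x → 0 ≤ y → pvMGet ((L.foldl (pvNbrStep w h_ good) (m, q)).1) y x = true →
      pvMGet m y x = true ∨ (x, y) ∈ (L.foldl (pvNbrStep w h_ good) (m, q)).2) := by
  intro L
  induction L with
  | nil =>
    intro m q hs
    refine ⟨hs, fun y x h => h, fun x y _ _ h => Or.inl h, ⟨[], by simp, by simp⟩,
      by simp, by simp, fun x y _ _ h => Or.inl h⟩
  | cons n L' ih =>
    intro m q hs
    simp only [List.foldl_cons]
    by_cases hg : 0 ≤ n.1 ∧ n.1 < w ∧ 0 ≤ n.2 ∧ n.2 < h_ ∧ pvMGet m n.2 n.1 = false ∧ good n.1 n.2 = true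
    · obtain ⟨hg1, hg2, hg3, hg4, hg5, hg6⟩ := hg
      rw [show pvNbrStep w h_ good (m, q) n = (pvMSet m n.2 n.1, q ++ [n]) from by
        unfold pvNbrStep; rw [if_pos ⟨hg1, hg2, hg3, hg4, hg5, hg6⟩]]
      have hs' := pvShaped_mset w h_ m n.2 n.1 hs
      obtain ⟨I1, I2, I3, ⟨t', ht', htm⟩, I5, I6, I7⟩ := ih (pvMSet m n.2 n.1) (q ++ [n]) hs'
      have hmkn : pvMGet ((L'.foldl (pvNbrStep w h_ good) (pvMSet m n.2 n.1, q ++ [n])).1) n.2 n.1 = true :=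
        I2 n.2 n.1 (pvMGet_mset_self w h_ m n.2 n.1 hs hg1 hg2 hg3 hg4)
      refine ⟨I1, ?_, ?_, ?_, ?_, ?_, ?_⟩
      · exact fun y x h => I2 y x (pvMGet_mset_true m n.2 n.1 y x h)
      · intro x y hx0 hy0 hmk
        rcases I3 x y hx0 hy0 hmk with h | h
        · rcases pvMGet_mset_new m n.2 n.1 y x hg1 hg3 hx0 hy0 h with h2 | h2
          · exact Or.inl h2
          · rw [h2.1, h2.2]
            exact Or.inr ⟨List.mem_cons_self, hg1, hg2, hg3, hg4, hg6⟩
        · exact Or.inr ⟨List.mem_cons_of_mem _ h.1, h.2.1, h.2.2.1, h.2.2.2.1, h.2.2.2.2.1, h.2.2.2.2.2⟩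
      · refine ⟨n :: t', by rw [ht']; simp, ?_⟩
        intro p hp
        rcases List.mem_cons.mp hp with h | h
        · subst h
          exact ⟨List.mem_cons_self, hg1, hg2, hg3, hg4, hg6, hmkn⟩
        · obtain ⟨hp1, hp2⟩ := htm p h
          exact ⟨List.mem_cons_of_mem _ hp1, hp2⟩
      · intro n' hn' h1 h2 h3 h4 h5
        rcases List.mem_cons.mp hn' with h | h
        · subst h; exact hmkn
        · exact I5 n' h h1 h2 h3 h4 h5
      · have hy2 : n.2.toNat < m.length := by rw [hs.1]; omega
        have hx2 : n.1.toNat < (m.getD n.2.toNat []).length := by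
          rw [List.getD_eq_getElem _ _ hy2, hs.2 _ (List.getElem_mem _)]
          omega
        have hc := pvCnt_mset m n.2 n.1 hy2 hx2 hg5
        rw [I6]
        simp only [List.length_append, List.length_cons, List.length_nil]
        omega
      · intro x y hx0 hy0 hmk
        rcases I7 x y hx0 hy0 hmk with h | h
        · rcases pvMGet_mset_new m n.2 n.1 y x hg1 hg3 hx0 hy0 h with h2 | h2
          · exact Or.inl h2
          · refine Or.inr ?_
            have : (x, y) = n := Prod.ext h2.1 h2.2
            rw [this, ht']
            simp
        · exact Or.inr h
    · rw [show pvNbrStep w h_ good (m, q) n = (m, q) from by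
        unfold pvNbrStep; rw [if_neg hg]]
      obtain ⟨I1, I2, I3, ⟨t', ht', htm⟩, I5, I6, I7⟩ := ih m q hs
      refine ⟨I1, I2, ?_, ?_, ?_, I6, I7⟩
      · intro x y hx0 hy0 hmk
        rcases I3 x y hx0 hy0 hmk with h | h
        · exact Or.inl h
        · exact Or.inr ⟨List.mem_cons_of_mem _ h.1, h.2⟩
      · refine ⟨t', ht', ?_⟩
        intro p hp
        obtain ⟨hp1, hp2⟩ := htm p hp
        exact ⟨List.mem_cons_of_mem _ hp1, hp2⟩
      · intro n' hn' h1 h2 h3 h4 h5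
        rcases List.mem_cons.mp hn' with h | h
        · subst h
          have hmm : pvMGet m n'.2 n'.1 = true := by
            cases e : pvMGet m n'.2 n'.1 with
            | false => exact absurd ⟨h1, h2, h3, h4, e, h5⟩ hg
            | true => rfl
          exact I2 n'.2 n'.1 hmm
        · exact I5 n' h h1 h2 h3 h4 h5

lemma pvBFS_correct (w h_ : Int) (good : Int → Int → Bool) (seeds : List (Int × Int)) :
    ∀ (fuel : Nat) (m : List (List Bool)) (q : List (Int × Int)),
    pvInvA w h_ good seeds m q → pvCnt m + q.length < fuel →
    pvShaped w h_ (pvBFS w h_ good fuel m q) ∧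
    (∀ x y, 0 ≤ x → x < w → 0 ≤ y → y < h_ →
      (pvMGet (pvBFS w h_ good fuel m q) y x = true ↔ pvReach w h_ good seeds x y)) := by
  intro fuel
  induction fuel with
  | zero => intro m q _ hfuel; omega
  | succ f ih =>
    intro m q hinv hfuel
    obtain ⟨V1, V2, V3, V4, V5⟩ := hinv
    cases q with
    | nil =>
      rw [show pvBFS w h_ good (f + 1) m [] = m from rfl]
      refine ⟨V1, ?_⟩
      intro x y h1 h2 h3 h4
      constructor
      · exact V3 x y h1 h2 h3 h4
      · refine pvReach_min w h_ good seeds (fun a b => pvMGet m b a = true) ?_ ?_ x y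
        · intro a b hab ha1 ha2 ha3 ha4 hg
          exact V4 (a, b) hab ha1 ha2 ha3 ha4 hg
        · intro a b na nb hr hm hadj hb1 hb2 hb3 hb4 hg
          obtain ⟨ha1, ha2, ha3, ha4, _⟩ := pvReach_bounds w h_ good seeds a b hr
          exact V5 a b ha1 ha2 ha3 ha4 hm (List.not_mem_nil) na nb hadj hb1 hb2 hb3 hb4 hg
    | cons p rest =>
      rw [show pvBFS w h_ good (f + 1) m (p :: rest)
          = pvBFS w h_ good f
            (([(p.1 + 1, p.2), (p.1 - 1, p.2), (p.1, p.2 + 1), (p.1, p.2 - 1)].foldl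
              (pvNbrStep w h_ good) (m, rest)).1)
            (([(p.1 + 1, p.2), (p.1 - 1, p.2), (p.1, p.2 + 1), (p.1, p.2 - 1)].foldl
              (pvNbrStep w h_ good) (m, rest)).2) from rfl]
      obtain ⟨F1, F2, F3, ⟨t, ht, htm⟩, F5, F6, F7⟩ :=
        pvFold_nbr w h_ good [(p.1 + 1, p.2), (p.1 - 1, p.2), (p.1, p.2 + 1), (p.1, p.2 - 1)] m rest V1
      obtain ⟨hp1, hp2, hp3, hp4, hp5⟩ := V2 p List.mem_cons_self
      have hpr : pvReach w h_ good seeds p.1 p.2 := V3 p.1 p.2 hp1 hp2 hp3 hp4 hp5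
      apply ih
      · refine ⟨F1, ?_, ?_, ?_, ?_⟩
        · intro p' hp'
          rw [ht] at hp'
          rcases List.mem_append.mp hp' with h | h
          · obtain ⟨c1, c2, c3, c4, c5⟩ := V2 p' (List.mem_cons_of_mem _ h)
            exact ⟨c1, c2, c3, c4, F2 p'.2 p'.1 c5⟩
          · obtain ⟨_, c1, c2, c3, c4, _, c6⟩ := htm p' h
            exact ⟨c1, c2, c3, c4, c6⟩
        · intro x y h1 h2 h3 h4 hmk
          rcases F3 x y h1 h3 hmk with h | h
          · exact V3 x y h1 h2 h3 h4 h
          · obtain ⟨hmem, _, _, _, _, hg⟩ := h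
            refine pvReach.step p.1 p.2 x y hpr (pvAdj_of_memL p (x, y) hmem) h1 h2 h3 h4 hg
        · intro s hsm c1 c2 c3 c4 c5
          exact F2 s.2 s.1 (V4 s hsm c1 c2 c3 c4 c5)
        · intro x y h1 h2 h3 h4 hmk hnotin nx ny hadj hb1 hb2 hb3 hb4 hg
          have hmm : pvMGet m y x = true := by
            rcases F7 x y h1 h3 hmk with h | h
            · exact h
            · exact absurd h hnotin
          by_cases hxy : (x, y) = p
          · have hx : x = p.1 := by rw [← hxy]
            have hy : y = p.2 := by rw [← hxy]
            subst hx; subst hy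
            exact F5 (nx, ny) (pvMemL_of_adj p nx ny hadj) hb1 hb2 hb3 hb4 hg
          · have hnin : (x, y) ∉ p :: rest := by
              intro hc
              rcases List.mem_cons.mp hc with h | h
              · exact hxy h
              · exact hnotin (by rw [ht]; exact List.mem_append_left _ h)
            exact F2 ny nx (V5 x y h1 h2 h3 h4 hmm hnin nx ny hadj hb1 hb2 hb3 hb4 hg)
      · rw [F6]
        simp only [List.length_cons] at hfuel
        omega

-- ===== seed loop =====

lemma pvFold_seed (w h_ : Int) (good : Int → Int → Bool) :
    ∀ (S : List (Int × Int)) (m : List (List Bool)) (q : List (Int × Int)),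
    pvShaped w h_ m →
    pvShaped w h_ ((S.foldl (pvSeedStep w h_ good) (m, q)).1) ∧
    (∀ y x, pvMGet m y x = true → pvMGet ((S.foldl (pvSeedStep w h_ good) (m, q)).1) y x = true) ∧
    (∀ x y, 0 ≤ x → 0 ≤ y → pvMGet ((S.foldl (pvSeedStep w h_ good) (m, q)).1) y x = true →
      pvMGet m y x = true ∨ ((x, y) ∈ S ∧ 0 ≤ x ∧ x < w ∧ 0 ≤ y ∧ y < h_ ∧ good x y = true)) ∧
    (∀ s ∈ S, 0 ≤ s.1 → s.1 < w → 0 ≤ s.2 → s.2 < h_ → good s.1 s.2 = true →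
      pvMGet ((S.foldl (pvSeedStep w h_ good) (m, q)).1) s.2 s.1 = true) ∧
    (∃ t, (S.foldl (pvSeedStep w h_ good) (m, q)).2 = q ++ t ∧
      ∀ p ∈ t, 0 ≤ p.1 ∧ p.1 < w ∧ 0 ≤ p.2 ∧ p.2 < h_ ∧
        pvMGet ((S.foldl (pvSeedStep w h_ good) (m, q)).1) p.2 p.1 = true) ∧
    (pvCnt ((S.foldl (pvSeedStep w h_ good) (m, q)).1) + ((S.foldl (pvSeedStep w h_ good) (m, q)).2).length
      ≤ pvCnt m + q.length + S.length) ∧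
    (∀ x y, 0 ≤ x → 0 ≤ y → pvMGet ((S.foldl (pvSeedStep w h_ good) (m, q)).1) y x = true →
      pvMGet m y x = true ∨ (x, y) ∈ (S.foldl (pvSeedStep w h_ good) (m, q)).2) := by
  intro S
  induction S with
  | nil =>
    intro m q hs
    refine ⟨hs, fun y x h => h, fun x y _ _ h => Or.inl h, by simp, ⟨[], by simp, by simp⟩,
      by simp, fun x y _ _ h => Or.inl h⟩
  | cons n S' ih =>
    intro m q hs
    simp only [List.foldl_cons]
    by_cases hg : 0 ≤ n.1 ∧ n.1 < w ∧ 0 ≤ n.2 ∧ n.2 < h_ ∧ good n.1 n.2 = true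
    · obtain ⟨hg1, hg2, hg3, hg4, hg6⟩ := hg
      rw [show pvSeedStep w h_ good (m, q) n = (pvMSet m n.2 n.1, q ++ [n]) from by
        unfold pvSeedStep; rw [if_pos ⟨hg1, hg2, hg3, hg4, hg6⟩]]
      have hs' := pvShaped_mset w h_ m n.2 n.1 hs
      obtain ⟨I1, I2, I3, I4, ⟨t', ht', htm⟩, I6, I7⟩ := ih (pvMSet m n.2 n.1) (q ++ [n]) hs'
      have hmkn : pvMGet ((S'.foldl (pvSeedStep w h_ good) (pvMSet m n.2 n.1, q ++ [n])).1) n.2 n.1 = true :=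
        I2 n.2 n.1 (pvMGet_mset_self w h_ m n.2 n.1 hs hg1 hg2 hg3 hg4)
      refine ⟨I1, ?_, ?_, ?_, ?_, ?_, ?_⟩
      · exact fun y x h => I2 y x (pvMGet_mset_true m n.2 n.1 y x h)
      · intro x y hx0 hy0 hmk
        rcases I3 x y hx0 hy0 hmk with h | h
        · rcases pvMGet_mset_new m n.2 n.1 y x hg1 hg3 hx0 hy0 h with h2 | h2
          · exact Or.inl h2
          · rw [h2.1, h2.2]
            exact Or.inr ⟨List.mem_cons_self, hg1, hg2, hg3, hg4, hg6⟩
        · exact Or.inr ⟨List.mem_cons_of_mem _ h.1, h.2⟩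
      · intro s hs2 h1 h2 h3 h4 h5
        rcases List.mem_cons.mp hs2 with h | h
        · subst h; exact hmkn
        · exact I4 s h h1 h2 h3 h4 h5
      · refine ⟨n :: t', by rw [ht']; simp, ?_⟩
        intro p hp
        rcases List.mem_cons.mp hp with h | h
        · subst h
          exact ⟨hg1, hg2, hg3, hg4, hmkn⟩
        · exact htm p h
      · have hle := pvCnt_mset_le m n.2 n.1
        simp only [List.length_append, List.length_cons, List.length_nil] at I6 ⊢
        omega
      · intro x y hx0 hy0 hmk
        rcases I7 x y hx0 hy0 hmk with h | h
        · rcases pvMGet_mset_new m n.2 n.1 y x hg1 hg3 hx0 hy0 h with h2 | h2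
          · exact Or.inl h2
          · refine Or.inr ?_
            rw [h2.1, h2.2, ht']
            simp
        · exact Or.inr h
    · rw [show pvSeedStep w h_ good (m, q) n = (m, q) from by
        unfold pvSeedStep; rw [if_neg hg]]
      obtain ⟨I1, I2, I3, I4, ⟨t', ht', htm⟩, I6, I7⟩ := ih m q hs
      refine ⟨I1, I2, ?_, ?_, ⟨t', ht', htm⟩, by simp only [List.length_cons]; omega, I7⟩
      · intro x y hx0 hy0 hmk
        rcases I3 x y hx0 hy0 hmk with h | h
        · exact Or.inl h
        · exact Or.inr ⟨List.mem_cons_of_mem _ h.1, h.2⟩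
      · intro s hs2 h1 h2 h3 h4 h5
        rcases List.mem_cons.mp hs2 with h | h
        · subst h; exact absurd ⟨h1, h2, h3, h4, h5⟩ hg
        · exact I4 s h h1 h2 h3 h4 h5

lemma pvSeedFold_fst (w h_ : Int) (good : Int → Int → Bool) :
    ∀ (S : List (Int × Int)) (m : List (List Bool)) (q : List (Int × Int)),
    (S.foldl (pvSeedStep w h_ good) (m, q)).1 = S.foldl (pvSeedMark w h_ good) m := by
  intro S
  induction S with
  | nil => intro m q; rfl
  | cons s S ih =>
    intro m q
    simp only [List.foldl_cons]
    unfold pvSeedStep pvSeedMark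
    by_cases hg : 0 ≤ s.1 ∧ s.1 < w ∧ 0 ≤ s.2 ∧ s.2 < h_ ∧ good s.1 s.2 = true
    · simp only [if_pos hg]; exact ih _ _
    · simp only [if_neg hg]; exact ih _ _

-- ===== B side =====

lemma pvPyRange01 (n : Int) :
    PySem.List.pyRange 0 n 1 = (List.range n.toNat).map (fun k : Nat => (k : Int)) := by
  by_cases h : n ≤ 0
  · rw [show n.toNat = 0 by omega]
    simp [PySem.List.pyRange]
    omega
  · obtain ⟨m, rfl⟩ := Int.eq_ofNat_of_zero_le (by omega : (0:Int) ≤ n)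
    rw [Int.toNat_natCast]
    exact PySem.List.pyRange_zero_natCast m

lemma pvStep_shaped (w h_ : Int) (good : Int → Int → Bool) (m : List (List Bool)) :
    pvShaped w h_ (pvStep w h_ good m) := by
  unfold pvStep
  simp only [pvPyRange01, List.map_map]
  constructor
  · simp
  · intro r hr
    obtain ⟨k, _, rfl⟩ := List.mem_map.mp hr
    simp

lemma pvStep_get (w h_ : Int) (good : Int → Int → Bool) (m : List (List Bool)) (x y : Int)
    (hx : 0 ≤ x) (hxw : x < w) (hy : 0 ≤ y) (hyh : y < h_) :
    pvMGet (pvStep w h_ good m) y x = pvEntry w h_ good m x y := by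
  have hyn : y.toNat < h_.toNat := by omega
  have hxn : x.toNat < w.toNat := by omega
  unfold pvMGet pvStep
  simp only [pvPyRange01, List.map_map]
  rw [List.getD_eq_getElem?_getD, List.getD_eq_getElem?_getD]
  simp [List.getElem?_map, List.getElem?_range, hyn, hxn, Int.toNat_of_nonneg hx, Int.toNat_of_nonneg hy]

lemma pvBoolRow_le (r s : List Bool) (h : List.Forall₂ (fun a b => a = true → b = true) r s) :
    s.count false ≤ r.count false := by
  induction h with
  | nil => simp
  | cons hab htail ih =>
    rename_i a b r' s'
    cases a <;> cases b <;> simp_all [List.count_cons] <;> omega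

lemma pvBoolRow_lt (r s : List Bool) (h : List.Forall₂ (fun a b => a = true → b = true) r s)
    (hne : r ≠ s) : s.count false < r.count false := by
  induction h with
  | nil => exact absurd rfl hne
  | cons hab htail ih =>
    rename_i a b r' s'
    by_cases ht : r' = s'
    · subst ht
      have hne2 : a ≠ b := by intro he; exact hne (by rw [he])
      cases a <;> cases b <;> simp_all [List.count_cons]
    · have h1 := ih ht
      cases a <;> cases b <;> simp_all [List.count_cons] <;> omega

lemma pvCnt_lt (m n : List (List Bool))
    (h : List.Forall₂ (List.Forall₂ (fun a b => a = true → b = true)) m n) (hne : m ≠ n) :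
    pvCnt n < pvCnt m := by
  induction h with
  | nil => exact absurd rfl hne
  | cons hrow htail ih =>
    rename_i r s m' n'
    by_cases ht : m' = n'
    · subst ht
      have hne2 : r ≠ s := by intro he; exact hne (by rw [he])
      have := pvBoolRow_lt r s hrow hne2
      simp only [pvCnt, List.map_cons, List.sum_cons]
      omega
    · have h1 := ih ht
      have h2 := pvBoolRow_le r s hrow
      simp only [pvCnt, List.map_cons, List.sum_cons] at h1 ⊢
      omega

lemma pvStep_forall₂ (w h_ : Int) (good : Int → Int → Bool) (m : List (List Bool))
    (hs : pvShaped w h_ m) :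
    List.Forall₂ (List.Forall₂ (fun a b => a = true → b = true)) m (pvStep w h_ good m) := by
  have hstep := pvStep_shaped w h_ good m
  rw [List.forall₂_iff_get]
  refine ⟨by rw [hs.1, hstep.1], ?_⟩
  intro i h1 h2
  rw [List.forall₂_iff_get]
  have hrow1 : (m.get ⟨i, h1⟩).length = w.toNat := hs.2 _ (List.get_mem _ _)
  have hrow2 : ((pvStep w h_ good m).get ⟨i, h2⟩).length = w.toNat := hstep.2 _ (List.get_mem _ _)
  refine ⟨by rw [hrow1, hrow2], ?_⟩
  intro j hj1 hj2
  intro hm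
  have hih : i < h_.toNat := hs.1 ▸ h1
  have hjw : j < w.toNat := hrow1 ▸ hj1
  have hval : ((pvStep w h_ good m).get ⟨i, h2⟩).get ⟨j, hj2⟩ = pvEntry w h_ good m (↑j) (↑i) := by
    simp only [List.get_eq_getElem]
    simp [pvStep, pvPyRange01, List.map_map]
  rw [hval]
  have hmj : pvMGet m (↑i) (↑j) = true := by
    rw [pvMGet_getElem m i j h1 (by simpa using hj1)]
    simpa using hm
  simp [pvEntry, hmj]

def pvInvB (w h_ : Int) (good : Int → Int → Bool) (seeds : List (Int × Int))
    (m : List (List Bool)) : Prop :=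
  pvShaped w h_ m ∧
  (∀ x y, 0 ≤ x → x < w → 0 ≤ y → y < h_ → pvMGet m y x = true → pvReach w h_ good seeds x y) ∧
  (∀ s ∈ seeds, 0 ≤ s.1 → s.1 < w → 0 ≤ s.2 → s.2 < h_ → good s.1 s.2 = true → pvMGet m s.2 s.1 = true)

lemma pvSweep_correct (w h_ : Int) (good : Int → Int → Bool) (seeds : List (Int × Int)) :
    ∀ (fuel : Nat) (m : List (List Bool)),
    pvInvB w h_ good seeds m → pvCnt m < fuel →
    pvShaped w h_ (pvSweep w h_ good fuel m) ∧
    (∀ x y, 0 ≤ x → x < w → 0 ≤ y → y < h_ →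
      (pvMGet (pvSweep w h_ good fuel m) y x = true ↔ pvReach w h_ good seeds x y)) := by
  intro fuel
  induction fuel with
  | zero => intro m _ hfuel; omega
  | succ f ih =>
    intro m hinv hfuel
    obtain ⟨V1, V2, V3⟩ := hinv
    rw [show pvSweep w h_ good (f + 1) m
        = if pvStep w h_ good m = m then m else pvSweep w h_ good f (pvStep w h_ good m) from rfl]
    by_cases he : pvStep w h_ good m = m
    · rw [if_pos he]
      refine ⟨V1, ?_⟩
      intro x y h1 h2 h3 h4
      constructor
      · exact V2 x y h1 h2 h3 h4
      · refine pvReach_min w h_ good seeds (fun a b => pvMGet m b a = true) ?_ ?_ x y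
        · intro a b hab ha1 ha2 ha3 ha4 hg
          exact V3 (a, b) hab ha1 ha2 ha3 ha4 hg
        · intro a b na nb hr hm hadj hb1 hb2 hb3 hb4 hg
          obtain ⟨ha1, ha2, ha3, ha4, _⟩ := pvReach_bounds w h_ good seeds a b hr
          have hent : pvMGet m nb na = pvEntry w h_ good m na nb := by
            conv_lhs => rw [← he]
            exact pvStep_get w h_ good m na nb hb1 hb2 hb3 hb4
          rw [hent]
          unfold pvEntry
          rcases hadj with ⟨r1, r2⟩ | ⟨r1, r2⟩ | ⟨r1, r2⟩ | ⟨r1, r2⟩ <;> rw [r1, r2] at hg ⊢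
          · have hp : (0:Int) < a + 1 := by omega
            simp [hp, ha2, ha4, hm, hg]
          · have hp : a - 1 + 1 < w := by omega
            simp [hp, ha2, ha4, hm, hg]
          · have hp : (0:Int) < b + 1 := by omega
            simp [hp, ha2, ha4, hm, hg]
          · have hp : b - 1 + 1 < h_ := by omega
            simp [hp, ha2, ha4, hm, hg]
    · rw [if_neg he]
      have hstepsh := pvStep_shaped w h_ good m
      apply ih
      · refine ⟨hstepsh, ?_, ?_⟩
        · intro x y h1 h2 h3 h4 hmk
          rw [pvStep_get w h_ good m x y h1 h2 h3 h4] at hmk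
          unfold pvEntry at hmk
          rcases Bool.or_eq_true_iff.mp hmk with h | h
          · exact V2 x y h1 h2 h3 h4 h
          · obtain ⟨hnb, hg⟩ := Bool.and_eq_true_iff.mp h
            rcases Bool.or_eq_true_iff.mp hnb with h' | h'
            · rcases Bool.or_eq_true_iff.mp h' with h'' | h''
              · rcases Bool.or_eq_true_iff.mp h'' with h3' | h3'
                · obtain ⟨hc, hmn⟩ := Bool.and_eq_true_iff.mp h3'
                  have hcw : x + 1 < w := by simpa using hc
                  have hr := V2 (x + 1) y (by omega) hcw h3 h4 hmn
                  exact pvReach.step (x + 1) y x y hr (Or.inr (Or.inl ⟨by ring, rfl⟩)) h1 h2 h3 h4 hg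
                · obtain ⟨hc, hmn⟩ := Bool.and_eq_true_iff.mp h3'
                  have hcx : (0:Int) < x := by simpa using hc
                  have hr := V2 (x - 1) y (by omega) (by omega) h3 h4 hmn
                  exact pvReach.step (x - 1) y x y hr (Or.inl ⟨by ring, rfl⟩) h1 h2 h3 h4 hg
              · obtain ⟨hc, hmn⟩ := Bool.and_eq_true_iff.mp h''
                have hch : y + 1 < h_ := by simpa using hc
                have hr := V2 x (y + 1) h1 h2 (by omega) hch hmn
                exact pvReach.step x (y + 1) x y hr (Or.inr (Or.inr (Or.inr ⟨rfl, by ring⟩))) h1 h2 h3 h4 hg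
            · obtain ⟨hc, hmn⟩ := Bool.and_eq_true_iff.mp h'
              have hcy : (0:Int) < y := by simpa using hc
              have hr := V2 x (y - 1) h1 h2 (by omega) (by omega) hmn
              exact pvReach.step x (y - 1) x y hr (Or.inr (Or.inr (Or.inl ⟨rfl, by ring⟩))) h1 h2 h3 h4 hg
        · intro s hsm c1 c2 c3 c4 c5
          rw [pvStep_get w h_ good m s.1 s.2 c1 c2 c3 c4]
          unfold pvEntry
          rw [V3 s hsm c1 c2 c3 c4 c5]
          simp
      · have hlt := pvCnt_lt m (pvStep w h_ good m) (pvStep_forall₂ w h_ good m V1) (fun hc => he hc.symm)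
        omega

-- ===== assembly =====

lemma pvMain (w h_ : Int) (good : Int → Int → Bool) (seeds : List (Int × Int)) :
    pvBFS w h_ good (h_.toNat * w.toNat + seeds.length + 1)
      (seeds.foldl (pvSeedStep w h_ good) (pvMask0 w h_, [])).1
      (seeds.foldl (pvSeedStep w h_ good) (pvMask0 w h_, [])).2
    = pvSweep w h_ good (h_.toNat * w.toNat + 1)
      (seeds.foldl (pvSeedMark w h_ good) (pvMask0 w h_)) := by
  rw [← pvSeedFold_fst w h_ good seeds (pvMask0 w h_) []]
  obtain ⟨S1, S2, S3, S4, ⟨t, ht, htm⟩, S6, S7⟩ :=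
    pvFold_seed w h_ good seeds (pvMask0 w h_) [] (pvShaped_mask0 w h_)
  have hreach : ∀ x y, 0 ≤ x → x < w → 0 ≤ y → y < h_ →
      pvMGet ((seeds.foldl (pvSeedStep w h_ good) (pvMask0 w h_, [])).1) y x = true →
      pvReach w h_ good seeds x y := by
    intro x y h1 h2 h3 h4 hmk
    rcases S3 x y h1 h3 hmk with h | h
    · rw [pvMGet_mask0] at h; exact Bool.noConfusion h
    · exact pvReach.seed x y h.1 h.2.1 h.2.2.1 h.2.2.2.1 h.2.2.2.2.1 h.2.2.2.2.2
  have hcnt0 := pvCnt_le w h_ (pvMask0 w h_) (pvShaped_mask0 w h_)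
  have hq1 : ∀ p ∈ (seeds.foldl (pvSeedStep w h_ good) (pvMask0 w h_, [])).2,
      0 ≤ p.1 ∧ p.1 < w ∧ 0 ≤ p.2 ∧ p.2 < h_ ∧
        pvMGet ((seeds.foldl (pvSeedStep w h_ good) (pvMask0 w h_, [])).1) p.2 p.1 = true := by
    intro p hp
    rw [ht] at hp
    exact htm p (by simpa using hp)
  have h5 : ∀ x y, 0 ≤ x → x < w → 0 ≤ y → y < h_ →
      pvMGet ((seeds.foldl (pvSeedStep w h_ good) (pvMask0 w h_, [])).1) y x = true →
      (x, y) ∉ (seeds.foldl (pvSeedStep w h_ good) (pvMask0 w h_, [])).2 →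
      ∀ nx ny, pvAdj x y nx ny → 0 ≤ nx → nx < w → 0 ≤ ny → ny < h_ → good nx ny = true →
        pvMGet ((seeds.foldl (pvSeedStep w h_ good) (pvMask0 w h_, [])).1) ny nx = true := by
    intro x y h1 h2 h3 h4 hmk hnotin nx ny hadj hb1 hb2 hb3 hb4 hgg
    rcases S7 x y h1 h3 hmk with h | h
    · rw [pvMGet_mask0] at h; exact Bool.noConfusion h
    · exact absurd h hnotin
  have hfuelA : pvCnt ((seeds.foldl (pvSeedStep w h_ good) (pvMask0 w h_, [])).1)
      + ((seeds.foldl (pvSeedStep w h_ good) (pvMask0 w h_, [])).2).length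
      < h_.toNat * w.toNat + seeds.length + 1 := by
    simp only [List.length_nil] at S6
    omega
  obtain ⟨shA, iffA⟩ := pvBFS_correct w h_ good seeds (h_.toNat * w.toNat + seeds.length + 1)
    ((seeds.foldl (pvSeedStep w h_ good) (pvMask0 w h_, [])).1)
    ((seeds.foldl (pvSeedStep w h_ good) (pvMask0 w h_, [])).2)
    ⟨S1, hq1, hreach, S4, h5⟩ hfuelA
  obtain ⟨shB, iffB⟩ := pvSweep_correct w h_ good seeds (h_.toNat * w.toNat + 1)
      ((seeds.foldl (pvSeedStep w h_ good) (pvMask0 w h_, [])).1)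
      ⟨S1, hreach, S4⟩ (by have := pvCnt_le w h_ _ S1; omega)
  apply pvMask_ext w h_ _ _ shA shB
  intro x y h1 h2 h3 h4
  rw [iffA x y h1 h2 h3 h4, iffB x y h1 h2 h3 h4]

-- ===== VERDICT (by name: the statement is the Claim_ definition above) =====
theorem flood_background_mask_spec : Claim_equal_flood_background_mask := by
  intro pixels w h_ seeds ref max_dist _ _
  unfold Spec_flood_background_mask flood_background_mask flood_background_mask_alt
  exact pvMain w h_ (pvGood pixels ref max_dist) seeds
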